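-- pv_equiv track=rewrite | github.com/LillianLi110130/bu_agent_cli | bu_agent_sdk/agent/tool_args.py | _decode_lenient_path_string
-- ===== SOURCE A (Python) =====
-- def _decode_lenient_path_string(raw_value: str) -> str:
--     chars: list[str] = []
--     i = 0
--
--     while i < len(raw_value):
--         char = raw_value[i]
--         if char != "\\":
--             chars.append(char)
--             i += 1
--             continue
--
--         next_index = i + 1
--         if next_index >= len(raw_value):
--             chars.append("\\")
--             break
--
--         next_char = raw_value[next_index]
--         if next_char in {'"', "\\", "/"}:
--             chars.append({'"': '"', "\\": "\\", "/": "/"}[next_char])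
--             i += 2
--             continue
--
--         if next_char == "u":
--             unicode_escape = raw_value[next_index + 1:next_index + 5]
--             if len(unicode_escape) == 4 and all(c in "0123456789abcdefABCDEF" for c in unicode_escape):
--                 chars.append(chr(int(unicode_escape, 16)))
--                 i += 6
--                 continue
--
--         chars.append("\\")
--         chars.append(next_char)
--         i += 2
--
--     return "".join(chars)
-- ===== SOURCE B (Python) =====
-- import re
--
-- _ESCAPE_RE = re.compile(r'\\(u[0-9a-fA-F]{4}|.|$)', re.DOTALL)
--
--
-- def _replace_escape(match):
--     group = match.group(1)
--     if group.startswith("u") and len(group) == 5: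
--         return chr(int(group[1:], 16))
--     if group in ('"', "\\", "/"):
--         return group
--     if group == "":
--         return "\\"
--     return "\\" + group
--
--
-- def _decode_lenient_path_string(raw_value: str) -> str:
--     return _ESCAPE_RE.sub(_replace_escape, raw_value)
-- ===== Notes on version B (the rewrite author's own statement) =====
-- stated objective: idiomatic
-- what changed: Replaced the manual index-and-append while-loop with a single compiled regex r'\\(u[0-9a-fA-F]{4}|.|$)' (DOTALL) applied via re.sub with a replacement callback; the ordered alternation encodes the valid-unicode-first / pass-through precedence, and the scan runs in the C regex engine instead of a per-character Python loop.
-- outside the precondition, e.g. on _decode_lenient_path_string('\\\\ud800'): A returns '\\ud800', B returns '\\ud800'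
import Mathlib
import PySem

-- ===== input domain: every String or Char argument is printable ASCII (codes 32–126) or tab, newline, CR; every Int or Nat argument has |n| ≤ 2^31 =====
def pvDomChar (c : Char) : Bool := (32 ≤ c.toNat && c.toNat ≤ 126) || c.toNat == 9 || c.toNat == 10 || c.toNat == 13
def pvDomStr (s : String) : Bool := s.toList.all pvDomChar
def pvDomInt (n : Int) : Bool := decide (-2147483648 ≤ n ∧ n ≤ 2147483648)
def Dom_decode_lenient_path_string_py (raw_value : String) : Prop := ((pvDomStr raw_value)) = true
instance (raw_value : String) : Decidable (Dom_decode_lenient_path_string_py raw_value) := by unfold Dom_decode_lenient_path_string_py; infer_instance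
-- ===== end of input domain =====

-- B replaces A's manual index loop with one compiled regex + replacement callback (objective: idiomatic).

-- ===== PORT A =====

-- c in "0123456789abcdefABCDEF"
def pvIsHex (c : Char) : Bool :=
  ('0' ≤ c && c ≤ '9') || ('a' ≤ c && c ≤ 'f') || ('A' ≤ c && c ≤ 'F')

-- value of a hex digit (int(c, 16) for a single hex digit)
def pvHexVal (c : Char) : Nat :=
  if '0' ≤ c && c ≤ '9' then c.toNat - '0'.toNat
  else if 'a' ≤ c && c ≤ 'f' then c.toNat - 'a'.toNat + 10
  else c.toNat - 'A'.toNat + 10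

-- chr(int(h1h2h3h4, 16))
def pvChr4 (h1 h2 h3 h4 : Char) : Char :=
  Char.ofNat (16 * (16 * (16 * pvHexVal h1 + pvHexVal h2) + pvHexVal h3) + pvHexVal h4)

-- A's while-loop over raw_value[i:], each step consuming the same characters as A
def pvALoop : List Char → List Char
  | [] => []
  | c :: rest =>
    if c ≠ '\\' then c :: pvALoop rest
    else
      match rest with
      | [] => ['\\']                                -- next_index >= len: append "\\" and break
      | n :: rest2 =>
        if n = '"' ∨ n = '\\' ∨ n = '/' then n :: pvALoop rest2
        else if n = 'u' then
          match rest2 with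
          | h1 :: h2 :: h3 :: h4 :: rest6 =>        -- the 4-char slice exists
            if pvIsHex h1 && pvIsHex h2 && pvIsHex h3 && pvIsHex h4 then
              pvChr4 h1 h2 h3 h4 :: pvALoop rest6
            else '\\' :: n :: pvALoop (h1 :: h2 :: h3 :: h4 :: rest6)
          | short => '\\' :: n :: pvALoop short     -- slice shorter than 4
        else '\\' :: n :: pvALoop rest2
termination_by l => l.length
decreasing_by all_goals (simp; try omega)

def decode_lenient_path_string_py (raw_value : String) : String :=
  String.ofList (pvALoop raw_value.toList)

-- ===== PORT B =====

-- Hand port of the regex engine on the specific pattern \\(u[0-9a-fA-F]{4}|.|$) with DOTALL: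
-- a match starts exactly at a backslash; pvMatchGroup tries the alternatives in order on the
-- text after the backslash and returns (captured group, remaining text). Exact for this pattern.
def pvMatchGroup : List Char → List Char × List Char
  | 'u' :: h1 :: h2 :: h3 :: h4 :: rest =>
    if pvIsHex h1 && pvIsHex h2 && pvIsHex h3 && pvIsHex h4 then
      (['u', h1, h2, h3, h4], rest)
    else (['u'], h1 :: h2 :: h3 :: h4 :: rest)      -- falls through to the '.' alternative
  | c :: rest => ([c], rest)                        -- '.' (DOTALL: matches any character)
  | [] => ([], [])                                  -- '$' alternative: empty group

theorem pvMatchGroup_snd_le (l : List Char) : (pvMatchGroup l).2.length ≤ l.length := by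
  unfold pvMatchGroup
  split
  · split <;> simp <;> omega
  · simp
  · simp

-- B's replacement callback _replace_escape (if-chain as in the Python; group[1:] parsed as hex)
def pvRepl (g : List Char) : List Char :=
  if g.head? = some 'u' ∧ g.length = 5 then
    [pvChr4 (g.getD 1 ' ') (g.getD 2 ' ') (g.getD 3 ' ') (g.getD 4 ' ')]
  else if g = ['"'] ∨ g = ['\\'] ∨ g = ['/'] then g
  else if g = [] then ['\\']
  else '\\' :: g

-- re.sub: copy text up to the next match (a backslash), splice in the callback's value, continue
def pvSub : List Char → List Char
  | [] => []
  | c :: rest =>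
    if c = '\\' then
      pvRepl (pvMatchGroup rest).1 ++ pvSub (pvMatchGroup rest).2
    else c :: pvSub rest
termination_by l => l.length
decreasing_by
  · exact Nat.lt_succ_of_le (pvMatchGroup_snd_le rest)
  · simp

def decode_lenient_path_string_py_alt (raw_value : String) : String :=
  String.ofList (pvSub raw_value.toList)

-- ===== PRECONDITION & SPEC =====

-- does a suffix start with \uXXXX whose value is a UTF-16 surrogate (D800–DFFF)?
def pvSurrHead : List Char → Bool
  | '\\' :: 'u' :: h1 :: h2 :: h3 :: h4 :: _ =>
    (h1 = 'd' || h1 = 'D') &&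
    (('8' ≤ h2 && h2 ≤ '9') || ('a' ≤ h2 && h2 ≤ 'f') || ('A' ≤ h2 && h2 ≤ 'F')) &&
    pvIsHex h3 && pvIsHex h4
  | _ => false

-- Pre_ excludes strings containing a backslash-u surrogate-range hex sequence (\uD800–\uDFFF):
-- there Python A returns a lone-surrogate str that is not representable as a Lean Char/String.
-- The scan is conservative: it also flags the pattern when its backslash is itself escaped.
def Pre_decode_lenient_path_string_py (raw_value : String) : Prop :=
  ∀ i < raw_value.toList.length, pvSurrHead (raw_value.toList.drop i) = false
instance (raw_value : String) : Decidable (Pre_decode_lenient_path_string_py raw_value) := by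
  unfold Pre_decode_lenient_path_string_py; infer_instance

def pvWitness_decode_lenient_path_string_py : String := "a\\u0041\\n\\\\"

def Spec_decode_lenient_path_string_py (raw_value : String) (out : String) : Prop :=
  out = decode_lenient_path_string_py_alt raw_value
instance (raw_value : String) (out : String) : Decidable (Spec_decode_lenient_path_string_py raw_value out) := by
  unfold Spec_decode_lenient_path_string_py; infer_instance

-- ===== CLAIM (what is proved, stated in full; the proofs are below) =====
def Claim_equal_decode_lenient_path_string_py : Prop := ∀ (raw_value : String), Dom_decode_lenient_path_string_py raw_value → Pre_decode_lenient_path_string_py raw_value → Spec_decode_lenient_path_string_py raw_value (decode_lenient_path_string_py raw_value)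

-- ===== LEMMAS AND PROOFS =====

-- the two traversals consume the same characters and emit the same pieces (in fact everywhere)
theorem pvALoop_eq_pvSub (l : List Char) : pvALoop l = pvSub l := by
  induction l using pvALoop.induct with
  | case1 => rw [pvALoop.eq_def, pvSub.eq_def]
  | case2 n rest2 hne ih =>
    rw [pvALoop.eq_def, pvSub.eq_def]; simp [hne, ih]
  | case3 n hbe =>
    simp only [ne_eq, not_not] at hbe; subst hbe
    rw [pvALoop.eq_def, pvSub.eq_def]; simp [pvMatchGroup, pvRepl]
    rw [pvSub.eq_def]
  | case4 n hbe m rest2 hm ih =>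
    simp only [ne_eq, not_not] at hbe; subst hbe
    rw [pvALoop.eq_def, pvSub.eq_def]
    rcases hm with h | h | h <;> subst h <;> simp [pvMatchGroup, pvRepl, ih]
  | case5 n hbe h1 h2 h3 h4 rest6 hhex hnq ih =>
    simp only [ne_eq, not_not] at hbe; subst hbe
    rw [pvALoop.eq_def, pvSub.eq_def]
    simp [pvMatchGroup, hhex, pvRepl, ih]
  | case6 n hbe h1 h2 h3 h4 rest6 hhex hnq ih =>
    simp only [ne_eq, not_not] at hbe; subst hbe
    rw [pvALoop.eq_def, pvSub.eq_def]
    simp [pvMatchGroup, hhex, pvRepl, ih]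
  | case7 n hbe short hshort hnq ih =>
    simp only [ne_eq, not_not] at hbe; subst hbe
    rcases short with _ | ⟨a, _ | ⟨b, _ | ⟨c, _ | ⟨d, t⟩⟩⟩⟩
    · rw [pvALoop.eq_def, pvSub.eq_def]; simp [pvMatchGroup, pvRepl, ih]
    · rw [pvALoop.eq_def, pvSub.eq_def]; simp [pvMatchGroup, pvRepl, ih]
    · rw [pvALoop.eq_def, pvSub.eq_def]; simp [pvMatchGroup, pvRepl, ih]
    · rw [pvALoop.eq_def, pvSub.eq_def]; simp [pvMatchGroup, pvRepl, ih]
    · exact absurd rfl (by exact fun h => hshort a b c d t h)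
  | case8 n hbe m rest2 hm hmu ih =>
    simp only [ne_eq, not_not] at hbe; subst hbe
    push Not at hm
    rw [pvALoop.eq_def, pvSub.eq_def]
    simp [pvMatchGroup, pvRepl, hm.1, hm.2.1, hm.2.2, hmu, ih]

-- ===== VERDICT (by name: the statement is the Claim_ definition above) =====
theorem decode_lenient_path_string_py_spec : Claim_equal_decode_lenient_path_string_py := by
  intro raw _ _
  unfold Spec_decode_lenient_path_string_py decode_lenient_path_string_py decode_lenient_path_string_py_alt
  rw [pvALoop_eq_pvSub]
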